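-- pv_equiv track=rewrite | github.com/violentwave/bazzite-laptop | ai/mcp_bridge/analytics_advanced/anomaly_detector.py | _generate_anomaly_recommendations
-- ===== SOURCE A (Python) =====
-- from typing import Any
--
-- def _generate_anomaly_recommendations(
--
--     anomalies: list[dict[str, Any]],
-- ) -> list[str]:
--     """Generate recommendations based on detected anomalies."""
--     recommendations = []
--
--     if any(a.get("anomaly_type") == "latency_spike" for a in anomalies):
--         recommendations.append("Investigate latency spikes - check for resource contention")
--
--     if any(a.get("anomaly_type") == "error_rate_spike" for a in anomalies):
--         recommendations.append(
--             "Review error logs for error rate spikes - may indicate service degradation"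
--         )
--
--     if any(a.get("anomaly_type") == "cost_spike" for a in anomalies):
--         recommendations.append(
--             "Analyze cost drivers - consider implementing cost caps or optimization"
--         )
--
--     if any(a.get("anomaly_type") == "usage_drop" for a in anomalies):
--         recommendations.append(
--             "Investigate usage drops - may indicate integration issues or feature problems"
--         )
--
--     return recommendations
-- ===== SOURCE B (Python) =====
-- def _generate_anomaly_recommendations(anomalies):
--     """Generate recommendations based on detected anomalies."""
--     BITS = {"latency_spike": 1, "error_rate_spike": 2, "cost_spike": 4, "usage_drop": 8}
--     mask = 0
--     for a in anomalies:
--         mask |= BITS.get(a.get("anomaly_type"), 0)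
--     RECS = [
--         "Investigate latency spikes - check for resource contention",
--         "Review error logs for error rate spikes - may indicate service degradation",
--         "Analyze cost drivers - consider implementing cost caps or optimization",
--         "Investigate usage drops - may indicate integration issues or feature problems",
--     ]
--     return [RECS[i] for i in range(4) if mask >> i & 1]
-- ===== Notes on version B (the rewrite author's own statement) =====
-- stated objective: alternative
-- what changed: Replaces A's four separate short-circuiting any()-scans over the anomaly list by a single fold that ORs each anomaly's type into a 4-bit mask via a bit table, then decodes the mask bits into the recommendation list.
import Mathlib
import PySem

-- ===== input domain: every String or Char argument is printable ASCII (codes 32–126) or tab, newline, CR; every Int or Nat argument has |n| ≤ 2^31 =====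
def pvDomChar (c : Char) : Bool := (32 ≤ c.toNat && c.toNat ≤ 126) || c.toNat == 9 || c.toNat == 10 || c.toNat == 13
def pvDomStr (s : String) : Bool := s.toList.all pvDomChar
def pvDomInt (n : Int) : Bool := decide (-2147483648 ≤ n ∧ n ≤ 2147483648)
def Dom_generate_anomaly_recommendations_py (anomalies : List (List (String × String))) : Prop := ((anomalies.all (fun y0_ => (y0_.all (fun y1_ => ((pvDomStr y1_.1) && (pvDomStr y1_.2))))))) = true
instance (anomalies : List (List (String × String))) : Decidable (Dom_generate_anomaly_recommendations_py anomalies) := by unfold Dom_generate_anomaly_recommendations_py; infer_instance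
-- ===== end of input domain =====

-- B replaces A's four any()-scans by one fold that ORs per-anomaly bits into a mask, then decodes the mask; same return value.
-- ===== PORT A =====
def generate_anomaly_recommendations_py (anomalies : List (List (String × String))) : List String :=
  let recommendations : List String := []
  let recommendations :=
    if anomalies.any (fun a => PySem.Dict.get? ⟨a⟩ "anomaly_type" == some "latency_spike") then
      recommendations ++ ["Investigate latency spikes - check for resource contention"]
    else recommendations
  let recommendations :=
    if anomalies.any (fun a => PySem.Dict.get? ⟨a⟩ "anomaly_type" == some "error_rate_spike") then
      recommendations ++ ["Review error logs for error rate spikes - may indicate service degradation"]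
    else recommendations
  let recommendations :=
    if anomalies.any (fun a => PySem.Dict.get? ⟨a⟩ "anomaly_type" == some "cost_spike") then
      recommendations ++ ["Analyze cost drivers - consider implementing cost caps or optimization"]
    else recommendations
  let recommendations :=
    if anomalies.any (fun a => PySem.Dict.get? ⟨a⟩ "anomaly_type" == some "usage_drop") then
      recommendations ++ ["Investigate usage drops - may indicate integration issues or feature problems"]
    else recommendations
  recommendations

-- ===== PORT B =====
def pvBITS : PySem.Dict String Nat :=
  ⟨[("latency_spike", 1), ("error_rate_spike", 2), ("cost_spike", 4), ("usage_drop", 8)]⟩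

-- BITS.get(a.get("anomaly_type"), 0); a missing/None key matches no string key, so the none case is the default 0 (exact)
def pvBitOf (o : Option String) : Nat :=
  match o with
  | some s => PySem.Dict.getD pvBITS s 0
  | none => 0

def pvRECS : List String :=
  ["Investigate latency spikes - check for resource contention",
   "Review error logs for error rate spikes - may indicate service degradation",
   "Analyze cost drivers - consider implementing cost caps or optimization",
   "Investigate usage drops - may indicate integration issues or feature problems"]

-- range(4) → List.range 4 (exact: small nonnegative range); 'mask >> i & 1' truthy → Nat.testBit mask i
-- (Nat.testBit IS (mask >>> i) &&& 1 == 1); RECS[i] with proven 0 ≤ i < 4 → getD (never hits the default)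
def generate_anomaly_recommendations_py_alt (anomalies : List (List (String × String))) : List String :=
  let mask : Nat :=
    anomalies.foldl (fun m a => m ||| pvBitOf (PySem.Dict.get? ⟨a⟩ "anomaly_type")) 0
  ((List.range 4).filter (fun i => Nat.testBit mask i)).map (fun i => pvRECS.getD i "")

-- ===== PRECONDITION & SPEC =====
def Spec_generate_anomaly_recommendations_py (anomalies : List (List (String × String))) (out : List String) : Prop := out = generate_anomaly_recommendations_py_alt anomalies
instance (anomalies : List (List (String × String))) (out : List String) : Decidable (Spec_generate_anomaly_recommendations_py anomalies out) := by unfold Spec_generate_anomaly_recommendations_py; infer_instance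

-- ===== CLAIM (what is proved, stated in full; the proofs are below) =====
def Claim_equal_generate_anomaly_recommendations_py : Prop := ∀ (anomalies : List (List (String × String))), Dom_generate_anomaly_recommendations_py anomalies → Spec_generate_anomaly_recommendations_py anomalies (generate_anomaly_recommendations_py anomalies)

-- ===== LEMMAS AND PROOFS =====
theorem pv_testBit_foldl_or {α : Type} (l : List α) (g : α → Nat) (m : Nat) (i : Nat) :
    (l.foldl (fun m a => m ||| g a) m).testBit i
      = (m.testBit i || l.any (fun a => (g a).testBit i)) := by
  induction l generalizing m with
  | nil => simp
  | cons x xs ih => simp [List.foldl_cons, ih, Nat.testBit_or, Bool.or_assoc]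

theorem pv_bitOf_testBit (o : Option String) :
    ((pvBitOf o).testBit 0 = (o == some "latency_spike"))
    ∧ ((pvBitOf o).testBit 1 = (o == some "error_rate_spike"))
    ∧ ((pvBitOf o).testBit 2 = (o == some "cost_spike"))
    ∧ ((pvBitOf o).testBit 3 = (o == some "usage_drop")) := by
  cases o with
  | none => decide
  | some s =>
    simp only [pvBitOf, pvBITS, PySem.Dict.getD, PySem.Dict.get?_mk_cons]
    split_ifs <;> simp_all [beq_iff_eq, PySem.Dict.get?] <;>
      first
        | (subst_vars; decide)
        | (constructor <;> try constructor) <;> (try constructor) <;>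
            simp_all [eq_comm]

-- ===== VERDICT (by name: the statement is the Claim_ definition above) =====
theorem generate_anomaly_recommendations_py_spec : Claim_equal_generate_anomaly_recommendations_py := by
  intro anomalies _
  unfold Spec_generate_anomaly_recommendations_py
  unfold generate_anomaly_recommendations_py generate_anomaly_recommendations_py_alt
  have b0 := fun o => (pv_bitOf_testBit o).1
  have b1 := fun o => (pv_bitOf_testBit o).2.1
  have b2 := fun o => (pv_bitOf_testBit o).2.2.1
  have b3 := fun o => (pv_bitOf_testBit o).2.2.2
  simp only [pv_testBit_foldl_or, Nat.zero_testBit, Bool.false_or,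
    show List.range 4 = [0, 1, 2, 3] from by decide, List.filter, b0, b1, b2, b3]
  cases h1 : anomalies.any (fun a => PySem.Dict.get? ⟨a⟩ "anomaly_type" == some "latency_spike") <;>
  cases h2 : anomalies.any (fun a => PySem.Dict.get? ⟨a⟩ "anomaly_type" == some "error_rate_spike") <;>
  cases h3 : anomalies.any (fun a => PySem.Dict.get? ⟨a⟩ "anomaly_type" == some "cost_spike") <;>
  cases h4 : anomalies.any (fun a => PySem.Dict.get? ⟨a⟩ "anomaly_type" == some "usage_drop") <;>
  simp_all [pvRECS]
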